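-- pv_equiv track=rewrite | github.com/koraySevil/pairwise-test-generator | pairwise.py | _count_covered
-- ===== SOURCE A (Python) =====
-- from typing import Any, Dict, List, Optional, Sequence, Tuple
--
-- def _count_covered(
--     row: List[str],
--     val: str,
--     k: int,
--     missing_pairs: List[Tuple[Tuple[int, str], Tuple[int, str]]],
-- ) -> int:
--     """Count how many missing pairs would be covered by assigning row[k]=val."""
--     count = 0
--     for i, row_val in enumerate(row):
--         if ((i, row_val), (k, val)) in missing_pairs:
--             count += 1
--     return count
-- ===== SOURCE B (Python) =====
-- from typing import List, Tuple
--
-- def _count_covered(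
--     row: List[str],
--     val: str,
--     k: int,
--     missing_pairs: List[Tuple[Tuple[int, str], Tuple[int, str]]],
-- ) -> int:
--     """Count how many missing pairs would be covered by assigning row[k]=val."""
--     return len({
--         i
--         for (i, v), kv in missing_pairs
--         if kv == (k, val) and 0 <= i < len(row) and row[i] == v
--     })
-- ===== Notes on version B (the rewrite author's own statement) =====
-- stated objective: faster
-- what changed: B iterates once over missing_pairs instead of probing missing_pairs from every row position: it collects into a set the row positions whose stored value matches and whose pair's second component is (k, val), and returns the set's size, eliminating A's per-position membership scan.
import Mathlib
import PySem

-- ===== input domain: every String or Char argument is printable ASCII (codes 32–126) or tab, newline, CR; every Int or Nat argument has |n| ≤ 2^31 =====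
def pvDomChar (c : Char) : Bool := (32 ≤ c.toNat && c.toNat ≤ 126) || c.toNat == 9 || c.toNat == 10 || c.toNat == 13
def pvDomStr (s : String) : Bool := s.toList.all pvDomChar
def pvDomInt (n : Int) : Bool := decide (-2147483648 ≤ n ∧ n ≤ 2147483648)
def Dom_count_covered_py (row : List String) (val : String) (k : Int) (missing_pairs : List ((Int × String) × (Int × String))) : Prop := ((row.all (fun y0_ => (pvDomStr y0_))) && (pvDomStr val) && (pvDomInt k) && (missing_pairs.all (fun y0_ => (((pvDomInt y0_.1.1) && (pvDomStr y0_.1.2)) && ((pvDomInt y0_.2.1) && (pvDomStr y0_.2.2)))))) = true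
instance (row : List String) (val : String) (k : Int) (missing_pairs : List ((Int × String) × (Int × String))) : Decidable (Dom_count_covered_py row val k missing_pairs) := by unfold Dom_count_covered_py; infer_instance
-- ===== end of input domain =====

-- B replaces A's per-position membership scan of missing_pairs by one pass over
-- missing_pairs collecting the matching row positions into a set; same return value.

-- ===== PORT A =====
def count_covered_py (row : List String) (val : String) (k : Int) (missing_pairs : List ((Int × String) × (Int × String))) : Int :=
  (PySem.List.enumerate row).foldl
    (fun count p => if ((p.1, p.2), (k, val)) ∈ missing_pairs then count + 1 else count) 0

-- ===== PORT B =====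
-- the set comprehension of Source B, built left to right with PySem.Set.add
def pvCoveredSet (row : List String) (val : String) (k : Int) (missing_pairs : List ((Int × String) × (Int × String))) : PySem.Set Int :=
  missing_pairs.foldl
    (fun s p =>
      if p.2 = (k, val) ∧ 0 ≤ p.1.1 ∧ p.1.1 < (row.length : Int) ∧ PySem.List.pyGet? row p.1.1 = some p.1.2
      then s.add p.1.1 else s)
    PySem.Set.empty

def count_covered_py_alt (row : List String) (val : String) (k : Int) (missing_pairs : List ((Int × String) × (Int × String))) : Int :=
  PySem.Set.len (pvCoveredSet row val k missing_pairs)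

-- ===== PRECONDITION & SPEC =====
def Spec_count_covered_py (row : List String) (val : String) (k : Int) (missing_pairs : List ((Int × String) × (Int × String))) (out : Int) : Prop := out = count_covered_py_alt row val k missing_pairs
instance (row : List String) (val : String) (k : Int) (missing_pairs : List ((Int × String) × (Int × String))) (out : Int) : Decidable (Spec_count_covered_py row val k missing_pairs out) := by unfold Spec_count_covered_py; infer_instance

-- ===== CLAIM (what is proved, stated in full; the proofs are below) =====
def Claim_equal_count_covered_py : Prop := ∀ (row : List String) (val : String) (k : Int) (missing_pairs : List ((Int × String) × (Int × String))), Dom_count_covered_py row val k missing_pairs → Spec_count_covered_py row val k missing_pairs (count_covered_py row val k missing_pairs)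

-- ===== LEMMAS AND PROOFS =====

-- membership in B's accumulated set
lemma pvCoveredSet_mem (row : List String) (val : String) (k : Int)
    (l : List ((Int × String) × (Int × String))) (s : PySem.Set Int) (x : Int) :
    x ∈ l.foldl (fun s p => if p.2 = (k, val) ∧ 0 ≤ p.1.1 ∧ p.1.1 < (row.length : Int) ∧ PySem.List.pyGet? row p.1.1 = some p.1.2 then s.add p.1.1 else s) s ↔
      x ∈ s ∨ ∃ p ∈ l, (p.2 = (k, val) ∧ 0 ≤ p.1.1 ∧ p.1.1 < (row.length : Int) ∧ PySem.List.pyGet? row p.1.1 = some p.1.2) ∧ p.1.1 = x := by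
  induction l generalizing s with
  | nil => simp
  | cons p l ih =>
    simp only [List.foldl_cons]
    by_cases h : p.2 = (k, val) ∧ 0 ≤ p.1.1 ∧ p.1.1 < (row.length : Int) ∧ PySem.List.pyGet? row p.1.1 = some p.1.2
    · rw [if_pos h, ih]
      simp only [PySem.Set.mem_add, List.mem_cons]
      constructor
      · rintro ((hs | rfl) | ⟨q, hq, hc, rfl⟩)
        · exact Or.inl hs
        · exact Or.inr ⟨p, Or.inl rfl, h, rfl⟩
        · exact Or.inr ⟨q, Or.inr hq, hc, rfl⟩
      · rintro (hs | ⟨q, (rfl | hq), hc, rfl⟩)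
        · exact Or.inl (Or.inl hs)
        · exact Or.inl (Or.inr rfl)
        · exact Or.inr ⟨q, hq, hc, rfl⟩
    · rw [if_neg h, ih]
      simp only [List.mem_cons]
      constructor
      · rintro (hs | ⟨q, hq, hc, rfl⟩)
        · exact Or.inl hs
        · exact Or.inr ⟨q, Or.inr hq, hc, rfl⟩
      · rintro (hs | ⟨q, (rfl | hq), hc, rfl⟩)
        · exact Or.inl hs
        · exact absurd hc h
        · exact Or.inr ⟨q, hq, hc, rfl⟩

lemma pvCoveredSet_nodup (row : List String) (val : String) (k : Int)
    (l : List ((Int × String) × (Int × String))) (s : PySem.Set Int) (hs : s.Nodup) :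
    (l.foldl (fun s p => if p.2 = (k, val) ∧ 0 ≤ p.1.1 ∧ p.1.1 < (row.length : Int) ∧ PySem.List.pyGet? row p.1.1 = some p.1.2 then s.add p.1.1 else s) s).Nodup := by
  induction l generalizing s with
  | nil => exact hs
  | cons p l ih =>
    simp only [List.foldl_cons]
    split_ifs with h
    · exact ih _ (PySem.Set.nodup_add s p.1.1 hs)
    · exact ih _ hs

-- enumerate row as a map over List.range
lemma pvEnum_eq (row : List String) :
    PySem.List.enumerate row = (List.range row.length).map (fun (i : Nat) => ((i : Int), row.getD i "")) := by
  apply List.ext_getElem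
  · simp [PySem.List.length_enumerate]
  · intro i h1 h2
    simp only [PySem.List.length_enumerate] at h1
    simp [PySem.List.getElem_enumerate, List.getElem?_eq_getElem h1]

-- the list of covered positions both programs count
def pvTarget (row : List String) (val : String) (k : Int) (missing_pairs : List ((Int × String) × (Int × String))) : List Int :=
  ((List.range row.length).map (fun (i : Nat) => (i : Int))).filter
    (fun x => decide (∃ p ∈ missing_pairs, (p.2 = (k, val) ∧ 0 ≤ p.1.1 ∧ p.1.1 < (row.length : Int) ∧ PySem.List.pyGet? row p.1.1 = some p.1.2) ∧ p.1.1 = x))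

lemma pvTarget_nodup (row : List String) (val : String) (k : Int) (mp : List ((Int × String) × (Int × String))) :
    (pvTarget row val k mp).Nodup :=
  List.Nodup.filter _ (List.nodup_range.map (fun a b h => by exact_mod_cast h))

lemma pvTarget_mem (row : List String) (val : String) (k : Int) (mp : List ((Int × String) × (Int × String))) (x : Int) :
    x ∈ pvTarget row val k mp ↔ ∃ p ∈ mp, (p.2 = (k, val) ∧ 0 ≤ p.1.1 ∧ p.1.1 < (row.length : Int) ∧ PySem.List.pyGet? row p.1.1 = some p.1.2) ∧ p.1.1 = x := by
  unfold pvTarget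
  simp only [List.mem_filter, List.mem_map, List.mem_range, decide_eq_true_eq]
  constructor
  · rintro ⟨_, h⟩; exact h
  · rintro ⟨p, hp, hc, hx⟩
    refine ⟨⟨p.1.1.toNat, ?_, ?_⟩, ⟨p, hp, hc, hx⟩⟩
    · obtain ⟨_, h0, hlt, _⟩ := hc; omega
    · obtain ⟨_, h0, _, _⟩ := hc; omega

lemma pvB_eq_target_len (row : List String) (val : String) (k : Int) (mp : List ((Int × String) × (Int × String))) :
    count_covered_py_alt row val k mp = ((pvTarget row val k mp).length : Int) := by
  have hS : (pvCoveredSet row val k mp).Nodup :=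
    pvCoveredSet_nodup row val k mp PySem.Set.empty List.nodup_nil
  have hT := pvTarget_nodup row val k mp
  have hfin : (pvCoveredSet row val k mp).toFinset = (pvTarget row val k mp).toFinset := by
    ext x
    simp only [List.mem_toFinset]
    rw [pvTarget_mem]
    unfold pvCoveredSet
    rw [pvCoveredSet_mem]
    simp [PySem.Set.empty]
  have hlen : (pvCoveredSet row val k mp).length = (pvTarget row val k mp).length := by
    rw [← List.toFinset_card_of_nodup hS, ← List.toFinset_card_of_nodup hT, hfin]
  unfold count_covered_py_alt PySem.Set.len
  rw [hlen]

lemma pvA_eq_target_len (row : List String) (val : String) (k : Int) (mp : List ((Int × String) × (Int × String))) :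
    count_covered_py row val k mp = ((pvTarget row val k mp).length : Int) := by
  unfold count_covered_py
  rw [show (fun (count : Int) (p : Int × String) => if ((p.1, p.2), (k, val)) ∈ mp then count + 1 else count)
        = (fun (count : Int) (p : Int × String) => if decide (((p.1, p.2), (k, val)) ∈ mp) = true then count + 1 else count)
      by funext c p; simp]
  rw [PySem.List.foldl_count_if, pvEnum_eq, List.countP_map]
  unfold pvTarget
  rw [← List.countP_eq_length_filter, List.countP_map]
  norm_num
  apply List.countP_congr
  intro i hi
  simp only [List.mem_range] at hi
  simp only [Function.comp, decide_eq_true_eq]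
  constructor
  · intro hm
    refine ⟨((↑i, row.getD i ""), (k, val)), hm, ⟨rfl, by show (0:Int) ≤ (i:Int); positivity, by show (i:Int) < (row.length:Int); exact_mod_cast hi, ?_⟩, rfl⟩
    rw [PySem.List.pyGet?_natCast]
    simp [List.getElem?_eq_getElem hi]
  · rintro ⟨p, hp, ⟨h2, h0, hlt, hget⟩, hx⟩
    have hpe : p = ((↑i, row.getD i ""), (k, val)) := by
      obtain ⟨⟨pi, pv⟩, pr⟩ := p
      simp only at hx h2 hget ⊢
      subst hx h2
      rw [PySem.List.pyGet?_natCast] at hget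
      rw [List.getElem?_eq_getElem hi] at hget
      simp only [Option.some_inj] at hget
      rw [List.getD_eq_getElem _ _ hi, hget]
    rwa [hpe] at hp

-- ===== VERDICT (by name: the statement is the Claim_ definition above) =====
theorem count_covered_py_spec : Claim_equal_count_covered_py := by
  intro row val k mp _
  unfold Spec_count_covered_py
  rw [pvA_eq_target_len, pvB_eq_target_len]
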